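-- pv_equiv track=rewrite | github.com/LevyHe/PyUds | pyps/tti.py | format_tx
-- ===== SOURCE A (Python) =====
-- def format_tx(cmdfmt):
--     subst = [("<rmt>", ""),
--              ("<nrf>", "%.3f"),
--              ("<nr1>", "%d"),
--              ("<nr2>", "%.3f"),
--              ("<n>", "%d")]
--     for r in subst:
--         cmdfmt = cmdfmt.replace(r[0], r[1])
--     return cmdfmt
-- ===== SOURCE B (Python) =====
-- def format_tx(cmdfmt):
--     table = [("<rmt>", ""),
--              ("<nrf>", "%.3f"),
--              ("<nr1>", "%d"),
--              ("<nr2>", "%.3f"),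
--              ("<n>", "%d")]
--     out = []
--     i = 0
--     n = len(cmdfmt)
--     while i < n:
--         for tok, rep in table:
--             if cmdfmt.startswith(tok, i):
--                 out.append(rep)
--                 i += len(tok)
--                 break
--         else:
--             out.append(cmdfmt[i])
--             i += 1
--     return ''.join(out)
-- ===== Notes on version B (the rewrite author's own statement) =====
-- stated objective: alternative
-- what changed: Five sequential full-string .replace passes are replaced by a single left-to-right scan that matches the token table at each position and emits the substitution immediately.
-- intended difference: On strings that contain a token of {<nrf>,<nr1>,<nr2>,<n>} split by one or more embedded '<rmt>' occurrences (e.g. '<n<rmt>>'), A's first pass deletes '<rmt>' and its later passes replace the newly merged token (A returns '%d'), while B's single pass leaves the fragments and only deletes '<rmt>' (B returns '<n>'); B's value is intended because a placeholder that is not literally present in the input should not be substituted. — e.g. on format_tx("<n<rmt>>"): A returns "%d", B returns "<n>"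
import Mathlib
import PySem

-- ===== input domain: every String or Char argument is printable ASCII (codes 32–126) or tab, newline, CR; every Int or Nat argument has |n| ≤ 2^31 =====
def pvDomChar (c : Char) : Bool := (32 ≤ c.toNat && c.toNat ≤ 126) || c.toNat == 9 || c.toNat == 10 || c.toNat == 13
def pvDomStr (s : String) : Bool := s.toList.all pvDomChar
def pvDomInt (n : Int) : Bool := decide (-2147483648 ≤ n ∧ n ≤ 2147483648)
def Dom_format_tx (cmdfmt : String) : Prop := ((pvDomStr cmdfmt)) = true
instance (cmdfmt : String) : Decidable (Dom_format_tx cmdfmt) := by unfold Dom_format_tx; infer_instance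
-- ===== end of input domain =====

set_option maxRecDepth 4000


-- B replaces A's five sequential full-string .replace passes by a single left-to-right
-- table-driven scan (alternative decomposition, same cost class).

-- ===== PORT A =====
-- literal transliteration: the subst list and the for-loop of replace passes
def format_tx (cmdfmt : String) : String :=
  let subst : List (String × String) :=
    [("<rmt>", ""), ("<nrf>", "%.3f"), ("<nr1>", "%d"), ("<nr2>", "%.3f"), ("<n>", "%d")]
  subst.foldl (fun acc r => PySem.Str.replace acc r.1 r.2) cmdfmt

-- ===== PORT B =====
def repF : List Char := ['%', '.', '3', 'f']
def repD : List Char := ['%', 'd']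

-- B's while-loop: at each position try the token table in order ("<rmt>", "<nrf>",
-- "<nr1>", "<nr2>", "<n>" — startswith / break, encoded as ordered patterns),
-- emit the replacement, else copy one character
def goB : List Char → List Char
  | [] => []
  | '<' :: 'r' :: 'm' :: 't' :: '>' :: t => goB t
  | '<' :: 'n' :: 'r' :: 'f' :: '>' :: t => repF ++ goB t
  | '<' :: 'n' :: 'r' :: '1' :: '>' :: t => repD ++ goB t
  | '<' :: 'n' :: 'r' :: '2' :: '>' :: t => repF ++ goB t
  | '<' :: 'n' :: '>' :: t => repD ++ goB t
  | c :: t => c :: goB t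

def format_tx_alt (cmdfmt : String) : String := String.ofList (goB cmdfmt.toList)

-- ===== PRECONDITION & SPEC =====
-- On strings containing a token of {<nrf>,<nr1>,<nr2>,<n>} split by one or more embedded
-- '<rmt>' occurrences (e.g. "<n<rmt>>"), A's first pass deletes '<rmt>' and its later
-- passes replace the newly merged token (A returns "%d"), while B's single pass only
-- deletes '<rmt>' and leaves the fragments (B returns "<n>"); B's value is intended
-- because a placeholder not literally present in the input should not be substituted.
-- smA rest pend cs saw: one-character automaton — cs starts with the token-remainder rest,
-- possibly interrupted by '<rmt>' occurrences (pend = the part of '<rmt>' still to be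
-- matched); saw records whether at least one '<rmt>' was skipped
def smA : List Char → List Char → List Char → Bool → Bool
  | [], [], _, saw => saw
  | _, _, [], _ => false
  | rest, p :: pend, c :: cs, saw => p == c && smA rest pend cs saw
  | a :: rest, [], c :: cs, saw =>
      (a == c && smA rest [] cs saw) ||
        (c == '<' && smA (a :: rest) "rmt>".toList cs true)

def splitTokAt (tok cs : List Char) : Bool :=
  match tok with
  | [] => false
  | a :: rest =>
    match cs with
    | [] => false
    | c :: cs' => a == c && smA rest [] cs' false

def hasSplit : List Char → Bool
  | [] => false
  | c :: t =>
    ((["<nrf>", "<nr1>", "<nr2>", "<n>"] : List String).any fun tok =>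
      splitTokAt tok.toList (c :: t)) || hasSplit t

def D_format_tx (cmdfmt : String) : Prop := hasSplit cmdfmt.toList = true
instance (cmdfmt : String) : Decidable (D_format_tx cmdfmt) := by unfold D_format_tx; infer_instance

def Spec_format_tx (cmdfmt : String) (out : String) : Prop :=
  ¬ D_format_tx cmdfmt → out = format_tx_alt cmdfmt
instance (cmdfmt : String) (out : String) : Decidable (Spec_format_tx cmdfmt out) := by
  unfold Spec_format_tx; infer_instance

def pvDiffWitness_format_tx : String := "<n<rmt>>"
def pvDiffWitnessOut_format_tx : String × String := ("%d", "<n>")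

-- ===== CLAIM (what is proved, stated in full; the proofs are below) =====
def Claim_unchanged_format_tx : Prop :=
  ∀ (cmdfmt : String), Dom_format_tx cmdfmt → Spec_format_tx cmdfmt (format_tx cmdfmt)
def Claim_changed_format_tx : Prop :=
  Dom_format_tx (pvDiffWitness_format_tx) ∧ D_format_tx (pvDiffWitness_format_tx) ∧
    format_tx (pvDiffWitness_format_tx) = pvDiffWitnessOut_format_tx.1 ∧
    format_tx_alt (pvDiffWitness_format_tx) = pvDiffWitnessOut_format_tx.2 ∧
    pvDiffWitnessOut_format_tx.1 ≠ pvDiffWitnessOut_format_tx.2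
def Claim_exact_format_tx : Prop :=
  ∀ (cmdfmt : String), Dom_format_tx cmdfmt → D_format_tx cmdfmt →
    format_tx cmdfmt ≠ format_tx_alt cmdfmt

-- ===== LEMMAS AND PROOFS =====

-- structural greedy single-token replace (pattern = a :: o, replacement r):
-- the meaning of one Python .replace pass
def rep1 (a : Char) (o r : List Char) : List Char → List Char
  | [] => []
  | c :: t =>
    if (a :: o).isPrefixOf (c :: t) then r ++ rep1 a o r (List.drop o.length t)
    else c :: rep1 a o r t
  termination_by l => l.length
  decreasing_by all_goals (simp; try omega)

theorem rep1_nil (a : Char) (o r : List Char) : rep1 a o r [] = [] := by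
  rw [rep1]

theorem rep1_pos (a : Char) (o r : List Char) (c : Char) (t : List Char)
    (h : (a :: o).isPrefixOf (c :: t) = true) :
    rep1 a o r (c :: t) = r ++ rep1 a o r (List.drop o.length t) := by
  rw [rep1, if_pos h]

theorem rep1_neg (a : Char) (o r : List Char) (c : Char) (t : List Char)
    (h : (a :: o).isPrefixOf (c :: t) = false) :
    rep1 a o r (c :: t) = c :: rep1 a o r t := by
  rw [rep1, if_neg (by simp [h])]

-- bridge: PySem's fuelled replace = rep1
theorem go_eq (a : Char) (o r : List Char) :
    ∀ (fuel : Nat) (l acc : List Char), l.length ≤ fuel →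
      PySem.Chars.replace.go (a :: o) r fuel l acc = acc.reverse ++ rep1 a o r l := by
  intro fuel
  induction fuel with
  | zero =>
    intro l acc h
    have : l = [] := by cases l <;> simp_all
    subst this
    simp [PySem.Chars.replace.go, rep1_nil]
  | succ n ih =>
    intro l acc h
    cases l with
    | nil => simp [PySem.Chars.replace.go, rep1_nil]
    | cons c t =>
      rw [PySem.Chars.replace.go]
      by_cases hp : (a :: o).isPrefixOf (c :: t) = true
      · rw [if_pos hp, rep1_pos a o r c t hp]
        have hlen : (List.drop o.length t).length ≤ n := by
          simp at h ⊢; omega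
        have hd : List.drop (a :: o).length (c :: t) = List.drop o.length t := by
          simp
        rw [hd, ih _ _ hlen]
        simp
      · rw [if_neg hp, rep1_neg a o r c t (Bool.eq_false_iff.mpr hp)]
        have hlen : t.length ≤ n := by simp at h; omega
        rw [ih _ _ hlen]
        simp

theorem replace_eq (a : Char) (o r l : List Char) :
    PySem.Chars.replace l (a :: o) r = rep1 a o r l := by
  rw [PySem.Chars.replace]
  simp [go_eq a o r l.length l [] (le_refl _)]

-- the A side as a composition of rep1 passes
def chain (l : List Char) : List Char :=
  rep1 '<' ['n', '>'] repD
    (rep1 '<' ['n', 'r', '2', '>'] repF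
      (rep1 '<' ['n', 'r', '1', '>'] repD
        (rep1 '<' ['n', 'r', 'f', '>'] repF
          (rep1 '<' ['r', 'm', 't', '>'] [] l))))

theorem formatA (s : String) : (format_tx s).toList = chain s.toList := by
  show (PySem.Str.replace (PySem.Str.replace (PySem.Str.replace (PySem.Str.replace
      (PySem.Str.replace s "<rmt>" "") "<nrf>" "%.3f") "<nr1>" "%d") "<nr2>" "%.3f") "<n>" "%d").toList
      = chain s.toList
  simp only [PySem.Str.toList_replace]
  rw [chain]
  rw [show ("<rmt>" : String).toList = '<' :: ['r', 'm', 't', '>'] from rfl,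
      show ("<nrf>" : String).toList = '<' :: ['n', 'r', 'f', '>'] from rfl,
      show ("<nr1>" : String).toList = '<' :: ['n', 'r', '1', '>'] from rfl,
      show ("<nr2>" : String).toList = '<' :: ['n', 'r', '2', '>'] from rfl,
      show ("<n>" : String).toList = '<' :: ['n', '>'] from rfl,
      show ("" : String).toList = ([] : List Char) from rfl,
      show ("%.3f" : String).toList = repF from rfl,
      show ("%d" : String).toList = repD from rfl]
  simp only [replace_eq]

-- pulling a '<'-free block through a pass
theorem pull_noLT (o r : List Char) :
    ∀ (P Z : List Char), (∀ x ∈ P, x ≠ '<') →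
      rep1 '<' o r (P ++ Z) = P ++ rep1 '<' o r Z := by
  intro P
  induction P with
  | nil => intro Z _; simp
  | cons p P' ih =>
    intro Z hP
    have hp : p ≠ '<' := hP p (by simp)
    have : (('<' :: o).isPrefixOf (p :: (P' ++ Z))) = false := by
      simp [List.isPrefixOf]
      intro h; exact absurd h.symm hp
    rw [List.cons_append, rep1_neg _ _ _ _ _ this, ih Z (fun x hx => hP x (by simp [hx]))]
    simp


-- pulling a block p :: Ptail through a pass when no match can start inside it
theorem pull_block (o r : List Char) (p : Char) (Ptail Z : List Char)
    (h : ('<' :: o).isPrefixOf (p :: (Ptail ++ Z)) = false) (hP : ∀ x ∈ Ptail, x ≠ '<') :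
    rep1 '<' o r ((p :: Ptail) ++ Z) = (p :: Ptail) ++ rep1 '<' o r Z := by
  rw [List.cons_append, rep1_neg _ _ _ _ _ h, pull_noLT o r Ptail Z hP]
  simp

-- a '%'-free prefix of a pass output (replacement starting with '%') is a prefix of the input
theorem strip_pct : ∀ (n : Nat) (X : List Char), X.length ≤ n →
    ∀ (o r' rest : List Char), '%' ∉ rest →
      rest <+: rep1 '<' o ('%' :: r') X → rest <+: X := by
  intro n
  induction n with
  | zero =>
    intro X hX o r' rest _ h
    have : X = [] := by cases X <;> simp_all
    subst this
    rw [rep1_nil] at h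
    exact h
  | succ n ih =>
    intro X hX o r' rest hrest h
    cases X with
    | nil => rw [rep1_nil] at h; exact h
    | cons x t =>
      by_cases hp : ('<' :: o).isPrefixOf (x :: t) = true
      · rw [rep1_pos _ _ _ _ _ hp] at h
        cases rest with
        | nil => exact List.nil_prefix
        | cons y ys =>
          rw [List.cons_append, List.cons_prefix_cons] at h
          exact absurd h.1.symm (by simp at hrest; exact hrest.1)
      · rw [rep1_neg _ _ _ _ _ (Bool.eq_false_iff.mpr hp)] at h
        cases rest with
        | nil => exact List.nil_prefix
        | cons y ys =>
          rw [List.cons_prefix_cons] at h ⊢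
          refine ⟨h.1, ih t (by simp at hX; omega) o r' ys (by simp at hrest; exact hrest.2) h.2⟩

-- smA equations in the relevant shapes
theorem smA_nil (t : List Char) (saw : Bool) : smA [] [] t saw = saw := by
  cases t <;> rfl

theorem smA_cons (a : Char) (rest : List Char) (c : Char) (cs : List Char) (saw : Bool) :
    smA (a :: rest) [] (c :: cs) saw =
      ((a == c && smA rest [] cs saw) || (c == '<' && smA (a :: rest) "rmt>".toList cs true)) := rfl

theorem smA_skip (rest cs : List Char) (saw : Bool) :
    smA rest "rmt>".toList ('r' :: 'm' :: 't' :: '>' :: cs) saw = smA rest [] cs saw := by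
  cases rest <;> rfl

-- the key reconstruction: a token remainder that prefixes the '<rmt>'-deleted tail
-- was either already there or is a split occurrence
theorem split_rec : ∀ (n : Nat) (t : List Char), t.length ≤ n →
    ∀ (rest : List Char) (saw : Bool),
      rest <+: rep1 '<' ['r', 'm', 't', '>'] [] t →
      smA rest [] t saw = true ∨ (saw = false ∧ rest <+: t) := by
  intro n
  induction n with
  | zero =>
    intro t ht rest saw h
    have : t = [] := by cases t <;> simp_all
    subst this
    rw [rep1_nil] at h
    have : rest = [] := List.prefix_nil.mp h
    subst this
    rw [smA_nil]
    cases saw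
    · exact Or.inr ⟨rfl, List.nil_prefix⟩
    · exact Or.inl rfl
  | succ n ih =>
    intro t ht rest saw h
    cases rest with
    | nil =>
      rw [smA_nil]
      cases saw
      · exact Or.inr ⟨rfl, List.nil_prefix⟩
      · exact Or.inl rfl
    | cons a r' =>
      cases t with
      | nil =>
        rw [rep1_nil] at h
        exact absurd h (by simp)
      | cons c t' =>
        by_cases hp : (['<', 'r', 'm', 't', '>'] : List Char).isPrefixOf (c :: t') = true
        · -- shape: c :: t' = '<' :: 'r' :: 'm' :: 't' :: '>' :: cs
          have hpre : (['<', 'r', 'm', 't', '>'] : List Char) <+: (c :: t') :=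
            List.isPrefixOf_iff_prefix.mp hp
          obtain ⟨cs, hcs⟩ := hpre
          injection hcs with hc ht'
          subst hc; subst ht'
          rw [rep1_pos _ _ _ _ _ hp] at h
          have h : (a :: r') <+: rep1 '<' ['r', 'm', 't', '>'] [] cs := by simpa using h
          have hlen : cs.length ≤ n := by simp at ht; omega
          have := ih cs hlen (a :: r') true h
          have hsm : smA (a :: r') [] cs true = true := by
            rcases this with h' | h'
            · exact h'
            · exact absurd h'.1 (by simp)
          simp only [List.append_eq, List.cons_append, List.nil_append]
          rw [smA_cons, smA_skip]
          simp [hsm]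
        · have hp' := Bool.eq_false_iff.mpr hp
          rw [rep1_neg _ _ _ _ _ hp'] at h
          rw [List.cons_prefix_cons] at h
          have hlen : t'.length ≤ n := by simp at ht; omega
          rcases ih t' hlen r' saw h.2 with h' | h'
          · exact Or.inl (by rw [smA_cons]; simp [h.1, h'])
          · exact Or.inr ⟨h'.1, by rw [List.cons_prefix_cons]; exact ⟨h.1, h'.2⟩⟩

-- goB equations
theorem goB_other (c : Char) (t : List Char)
    (h0 : (['<', 'r', 'm', 't', '>'] : List Char).isPrefixOf (c :: t) = false)
    (h1 : (['<', 'n', 'r', 'f', '>'] : List Char).isPrefixOf (c :: t) = false)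
    (h2 : (['<', 'n', 'r', '1', '>'] : List Char).isPrefixOf (c :: t) = false)
    (h3 : (['<', 'n', 'r', '2', '>'] : List Char).isPrefixOf (c :: t) = false)
    (h4 : (['<', 'n', '>'] : List Char).isPrefixOf (c :: t) = false) :
    goB (c :: t) = c :: goB t := by
  rw [goB.eq_def]
  split <;> simp_all [List.isPrefixOf]

-- hasSplit is closed under dropping a prefix
theorem hasSplit_tail (c : Char) (t : List Char) (h : hasSplit (c :: t) = false) :
    hasSplit t = false := by
  rw [hasSplit] at h
  simp only [Bool.or_eq_false_iff] at h
  exact h.2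

theorem hasSplit_drop : ∀ (k : Nat) (l : List Char), hasSplit l = false →
    hasSplit (List.drop k l) = false := by
  intro k
  induction k with
  | zero => intro l h; simpa using h
  | succ k ih =>
    intro l h
    cases l with
    | nil => simpa using h
    | cons c t => exact ih t (hasSplit_tail c t h)

theorem hasSplit_parts (c : Char) (t : List Char) (h : hasSplit (c :: t) = false) :
    splitTokAt ['<', 'n', 'r', 'f', '>'] (c :: t) = false ∧
    splitTokAt ['<', 'n', 'r', '1', '>'] (c :: t) = false ∧
    splitTokAt ['<', 'n', 'r', '2', '>'] (c :: t) = false ∧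
    splitTokAt ['<', 'n', '>'] (c :: t) = false := by
  rw [hasSplit] at h
  have hAny := (Bool.or_eq_false_iff.mp h).1
  have hAll := List.any_eq_false.mp hAny
  refine ⟨?_, ?_, ?_, ?_⟩
  · have hx := hAll "<nrf>" (by simp)
    rw [show ("<nrf>" : String).toList = ['<', 'n', 'r', 'f', '>'] from rfl] at hx
    exact Bool.eq_false_iff.mpr hx
  · have hx := hAll "<nr1>" (by simp)
    rw [show ("<nr1>" : String).toList = ['<', 'n', 'r', '1', '>'] from rfl] at hx
    exact Bool.eq_false_iff.mpr hx
  · have hx := hAll "<nr2>" (by simp)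
    rw [show ("<nr2>" : String).toList = ['<', 'n', 'r', '2', '>'] from rfl] at hx
    exact Bool.eq_false_iff.mpr hx
  · have hx := hAll "<n>" (by simp)
    rw [show ("<n>" : String).toList = ['<', 'n', '>'] from rfl] at hx
    exact Bool.eq_false_iff.mpr hx

-- goB on each token
theorem goB_rmt (Z : List Char) : goB ('<' :: 'r' :: 'm' :: 't' :: '>' :: Z) = goB Z := rfl
theorem goB_nrf (Z : List Char) : goB ('<' :: 'n' :: 'r' :: 'f' :: '>' :: Z) = repF ++ goB Z := rfl
theorem goB_nr1 (Z : List Char) : goB ('<' :: 'n' :: 'r' :: '1' :: '>' :: Z) = repD ++ goB Z := rfl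
theorem goB_nr2 (Z : List Char) : goB ('<' :: 'n' :: 'r' :: '2' :: '>' :: Z) = repF ++ goB Z := rfl
theorem goB_n (Z : List Char) : goB ('<' :: 'n' :: '>' :: Z) = repD ++ goB Z := rfl

-- chain on each token
theorem chain_rmt (Z : List Char) : chain ('<' :: 'r' :: 'm' :: 't' :: '>' :: Z) = chain Z := by
  rw [chain, chain, rep1_pos '<' ['r', 'm', 't', '>'] [] _ _ (by rfl)]
  simp

theorem chain_nrf (Z : List Char) : chain ('<' :: 'n' :: 'r' :: 'f' :: '>' :: Z) = repF ++ chain Z := by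
  rw [chain, chain]
  rw [show ('<' :: 'n' :: 'r' :: 'f' :: '>' :: Z) = ('<' :: ['n', 'r', 'f', '>']) ++ Z by simp]
  rw [pull_block ['r', 'm', 't', '>'] [] '<' ['n', 'r', 'f', '>'] Z (by rfl) (by simp)]
  simp only [List.cons_append, List.nil_append]
  rw [rep1_pos '<' ['n', 'r', 'f', '>'] repF _ _ (by rfl)]
  simp only [List.length_cons, List.length_nil, List.drop_succ_cons, List.drop_zero]
  rw [show (repF ++ rep1 '<' ['n', 'r', 'f', '>'] repF (rep1 '<' ['r', 'm', 't', '>'] [] Z)) =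
        ('%' :: ['.', '3', 'f']) ++ rep1 '<' ['n', 'r', 'f', '>'] repF (rep1 '<' ['r', 'm', 't', '>'] [] Z) from rfl]
  rw [pull_block ['n', 'r', '1', '>'] repD '%' ['.', '3', 'f'] _ (by rfl) (by simp)]
  rw [pull_block ['n', 'r', '2', '>'] repF '%' ['.', '3', 'f'] _ (by rfl) (by simp)]
  rw [pull_block ['n', '>'] repD '%' ['.', '3', 'f'] _ (by rfl) (by simp)]
  rfl

theorem chain_nr1 (Z : List Char) : chain ('<' :: 'n' :: 'r' :: '1' :: '>' :: Z) = repD ++ chain Z := by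
  rw [chain, chain]
  rw [show ('<' :: 'n' :: 'r' :: '1' :: '>' :: Z) = ('<' :: ['n', 'r', '1', '>']) ++ Z by simp]
  rw [pull_block ['r', 'm', 't', '>'] [] '<' ['n', 'r', '1', '>'] Z (by rfl) (by simp)]
  rw [pull_block ['n', 'r', 'f', '>'] repF '<' ['n', 'r', '1', '>'] _ (by rfl) (by simp)]
  simp only [List.cons_append, List.nil_append]
  rw [rep1_pos '<' ['n', 'r', '1', '>'] repD _ _ (by rfl)]
  simp only [List.length_cons, List.length_nil, List.drop_succ_cons, List.drop_zero]
  rw [show (repD ++ rep1 '<' ['n', 'r', '1', '>'] repD (rep1 '<' ['n', 'r', 'f', '>'] repF (rep1 '<' ['r', 'm', 't', '>'] [] Z))) =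
        ('%' :: ['d']) ++ rep1 '<' ['n', 'r', '1', '>'] repD (rep1 '<' ['n', 'r', 'f', '>'] repF (rep1 '<' ['r', 'm', 't', '>'] [] Z)) from rfl]
  rw [pull_block ['n', 'r', '2', '>'] repF '%' ['d'] _ (by rfl) (by simp)]
  rw [pull_block ['n', '>'] repD '%' ['d'] _ (by rfl) (by simp)]
  rfl

theorem chain_nr2 (Z : List Char) : chain ('<' :: 'n' :: 'r' :: '2' :: '>' :: Z) = repF ++ chain Z := by
  rw [chain, chain]
  rw [show ('<' :: 'n' :: 'r' :: '2' :: '>' :: Z) = ('<' :: ['n', 'r', '2', '>']) ++ Z by simp]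
  rw [pull_block ['r', 'm', 't', '>'] [] '<' ['n', 'r', '2', '>'] Z (by rfl) (by simp)]
  rw [pull_block ['n', 'r', 'f', '>'] repF '<' ['n', 'r', '2', '>'] _ (by rfl) (by simp)]
  rw [pull_block ['n', 'r', '1', '>'] repD '<' ['n', 'r', '2', '>'] _ (by rfl) (by simp)]
  simp only [List.cons_append, List.nil_append]
  rw [rep1_pos '<' ['n', 'r', '2', '>'] repF _ _ (by rfl)]
  simp only [List.length_cons, List.length_nil, List.drop_succ_cons, List.drop_zero]
  rw [show (repF ++ rep1 '<' ['n', 'r', '2', '>'] repF (rep1 '<' ['n', 'r', '1', '>'] repD (rep1 '<' ['n', 'r', 'f', '>'] repF (rep1 '<' ['r', 'm', 't', '>'] [] Z)))) =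
        ('%' :: ['.', '3', 'f']) ++ rep1 '<' ['n', 'r', '2', '>'] repF (rep1 '<' ['n', 'r', '1', '>'] repD (rep1 '<' ['n', 'r', 'f', '>'] repF (rep1 '<' ['r', 'm', 't', '>'] [] Z))) from rfl]
  rw [pull_block ['n', '>'] repD '%' ['.', '3', 'f'] _ (by rfl) (by simp)]
  rfl

theorem chain_n (Z : List Char) : chain ('<' :: 'n' :: '>' :: Z) = repD ++ chain Z := by
  rw [chain, chain]
  rw [show ('<' :: 'n' :: '>' :: Z) = ('<' :: ['n', '>']) ++ Z by simp]
  rw [pull_block ['r', 'm', 't', '>'] [] '<' ['n', '>'] Z (by rfl) (by simp)]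
  rw [pull_block ['n', 'r', 'f', '>'] repF '<' ['n', '>'] _ (by rfl) (by simp)]
  rw [pull_block ['n', 'r', '1', '>'] repD '<' ['n', '>'] _ (by rfl) (by simp)]
  rw [pull_block ['n', 'r', '2', '>'] repF '<' ['n', '>'] _ (by rfl) (by simp)]
  simp only [List.cons_append, List.nil_append]
  rw [rep1_pos '<' ['n', '>'] repD _ _ (by rfl)]
  simp only [List.length_cons, List.length_nil, List.drop_succ_cons, List.drop_zero]

-- a token remainder cannot prefix the '<rmt>'-processed tail when the input has no
-- split occurrence and no direct token occurrence at this position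
theorem no_new_tok (n : Nat) (c : Char) (t : List Char) (ht : t.length ≤ n)
    (tokTail : List Char)
    (hdir : (c :: tokTail).isPrefixOf (c :: t) = false)
    (hsplit : splitTokAt (c :: tokTail) (c :: t) = false)
    (hpre : tokTail <+: rep1 '<' ['r', 'm', 't', '>'] [] t) : False := by
  rcases split_rec n t ht tokTail false hpre with hsm | hd
  · have hx : splitTokAt (c :: tokTail) (c :: t) = true := by
      simp [splitTokAt, hsm]
    rw [hx] at hsplit; cases hsplit
  · have hx : (c :: tokTail).isPrefixOf (c :: t) = true :=
      List.isPrefixOf_iff_prefix.mpr (List.cons_prefix_cons.mpr ⟨rfl, hd.2⟩)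
    rw [hx] at hdir; cases hdir

-- the chain copies one character when no token and no split starts here
theorem chain_cons_step (n : Nat) (c : Char) (t : List Char) (htn : t.length ≤ n)
    (h0f : (['<', 'r', 'm', 't', '>'] : List Char).isPrefixOf (c :: t) ≠ true)
    (h1f : (['<', 'n', 'r', 'f', '>'] : List Char).isPrefixOf (c :: t) ≠ true)
    (h2f : (['<', 'n', 'r', '1', '>'] : List Char).isPrefixOf (c :: t) ≠ true)
    (h3f : (['<', 'n', 'r', '2', '>'] : List Char).isPrefixOf (c :: t) ≠ true)
    (h4f : (['<', 'n', '>'] : List Char).isPrefixOf (c :: t) ≠ true)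
    (hp1 : splitTokAt ['<', 'n', 'r', 'f', '>'] (c :: t) = false)
    (hp2 : splitTokAt ['<', 'n', 'r', '1', '>'] (c :: t) = false)
    (hp3 : splitTokAt ['<', 'n', 'r', '2', '>'] (c :: t) = false)
    (hp4 : splitTokAt ['<', 'n', '>'] (c :: t) = false) :
    chain (c :: t) = c :: chain t := by
  have h0f := Bool.eq_false_iff.mpr h0f
  have h1f := Bool.eq_false_iff.mpr h1f
  have h2f := Bool.eq_false_iff.mpr h2f
  have h3f := Bool.eq_false_iff.mpr h3f
  have h4f := Bool.eq_false_iff.mpr h4f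
  have hF : (['<', 'n', 'r', 'f', '>'] : List Char).isPrefixOf
      (c :: rep1 '<' ['r', 'm', 't', '>'] [] t) = false := by
    by_contra hcon
    rw [Bool.not_eq_false] at hcon
    rcases List.cons_prefix_cons.mp (List.isPrefixOf_iff_prefix.mp hcon) with ⟨hceq, hpre⟩
    subst hceq
    exact no_new_tok n _ t htn _ h1f hp1 hpre
  have hN1 : (['<', 'n', 'r', '1', '>'] : List Char).isPrefixOf
      (c :: rep1 '<' ['n', 'r', 'f', '>'] repF (rep1 '<' ['r', 'm', 't', '>'] [] t)) = false := by
    by_contra hcon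
    rw [Bool.not_eq_false] at hcon
    rcases List.cons_prefix_cons.mp (List.isPrefixOf_iff_prefix.mp hcon) with ⟨hceq, hpre⟩
    subst hceq
    have hpreA := strip_pct (rep1 '<' ['r', 'm', 't', '>'] [] t).length _ le_rfl
      ['n', 'r', 'f', '>'] ['.', '3', 'f'] ['n', 'r', '1', '>'] (by simp) hpre
    exact no_new_tok n _ t htn _ h2f hp2 hpreA
  have hN2 : (['<', 'n', 'r', '2', '>'] : List Char).isPrefixOf
      (c :: rep1 '<' ['n', 'r', '1', '>'] repD (rep1 '<' ['n', 'r', 'f', '>'] repF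
        (rep1 '<' ['r', 'm', 't', '>'] [] t))) = false := by
    by_contra hcon
    rw [Bool.not_eq_false] at hcon
    rcases List.cons_prefix_cons.mp (List.isPrefixOf_iff_prefix.mp hcon) with ⟨hceq, hpre⟩
    subst hceq
    have hpreA := strip_pct _ _ le_rfl ['n', 'r', '1', '>'] ['d'] ['n', 'r', '2', '>'] (by simp) hpre
    have hpreB := strip_pct _ _ le_rfl ['n', 'r', 'f', '>'] ['.', '3', 'f'] ['n', 'r', '2', '>'] (by simp) hpreA
    exact no_new_tok n _ t htn _ h3f hp3 hpreB
  have hNn : (['<', 'n', '>'] : List Char).isPrefixOf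
      (c :: rep1 '<' ['n', 'r', '2', '>'] repF (rep1 '<' ['n', 'r', '1', '>'] repD
        (rep1 '<' ['n', 'r', 'f', '>'] repF (rep1 '<' ['r', 'm', 't', '>'] [] t)))) = false := by
    by_contra hcon
    rw [Bool.not_eq_false] at hcon
    rcases List.cons_prefix_cons.mp (List.isPrefixOf_iff_prefix.mp hcon) with ⟨hceq, hpre⟩
    subst hceq
    have hpreA := strip_pct _ _ le_rfl ['n', 'r', '2', '>'] ['.', '3', 'f'] ['n', '>'] (by simp) hpre
    have hpreB := strip_pct _ _ le_rfl ['n', 'r', '1', '>'] ['d'] ['n', '>'] (by simp) hpreA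
    have hpreC := strip_pct _ _ le_rfl ['n', 'r', 'f', '>'] ['.', '3', 'f'] ['n', '>'] (by simp) hpreB
    exact no_new_tok n _ t htn _ h4f hp4 hpreC
  rw [chain, rep1_neg _ _ _ _ _ h0f, rep1_neg _ _ _ _ _ hF,
      rep1_neg _ _ _ _ _ hN1, rep1_neg _ _ _ _ _ hN2, rep1_neg _ _ _ _ _ hNn]
  rfl

-- MAIN: outside the split region the five-pass chain equals the one-pass scan
theorem main_eq : ∀ (n : Nat) (l : List Char), l.length ≤ n → hasSplit l = false →
    chain l = goB l := by
  intro n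
  induction n with
  | zero =>
    intro l hl _
    have : l = [] := by cases l <;> simp_all
    subst this
    rw [chain]
    simp only [rep1_nil]
    rfl
  | succ n ih =>
    intro l hl hS
    cases l with
    | nil =>
      rw [chain]; simp only [rep1_nil]; rfl
    | cons c t =>
      by_cases h0 : (['<', 'r', 'm', 't', '>'] : List Char).isPrefixOf (c :: t) = true
      · obtain ⟨Z, hZ⟩ := List.isPrefixOf_iff_prefix.mp h0
        injection hZ with hc ht2
        subst hc; subst ht2
        try simp only [List.append_eq, List.cons_append, List.nil_append]
        rw [chain_rmt, goB_rmt]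
        exact ih Z (by simp at hl; omega) (hasSplit_drop 5 _ hS)
      · by_cases h1 : (['<', 'n', 'r', 'f', '>'] : List Char).isPrefixOf (c :: t) = true
        · obtain ⟨Z, hZ⟩ := List.isPrefixOf_iff_prefix.mp h1
          injection hZ with hc ht2
          subst hc; subst ht2
          try simp only [List.append_eq, List.cons_append, List.nil_append]
          try simp only [List.append_eq, List.cons_append, List.nil_append]
          rw [chain_nrf, goB_nrf]
          exact congrArg (repF ++ ·) (ih Z (by simp at hl; omega) (hasSplit_drop 5 _ hS))
        · by_cases h2 : (['<', 'n', 'r', '1', '>'] : List Char).isPrefixOf (c :: t) = true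
          · obtain ⟨Z, hZ⟩ := List.isPrefixOf_iff_prefix.mp h2
            injection hZ with hc ht2
            subst hc; subst ht2
            try simp only [List.append_eq, List.cons_append, List.nil_append]
            try simp only [List.append_eq, List.cons_append, List.nil_append]
            rw [chain_nr1, goB_nr1]
            exact congrArg (repD ++ ·) (ih Z (by simp at hl; omega) (hasSplit_drop 5 _ hS))
          · by_cases h3 : (['<', 'n', 'r', '2', '>'] : List Char).isPrefixOf (c :: t) = true
            · obtain ⟨Z, hZ⟩ := List.isPrefixOf_iff_prefix.mp h3
              injection hZ with hc ht2
              subst hc; subst ht2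
              try simp only [List.append_eq, List.cons_append, List.nil_append]
              try simp only [List.append_eq, List.cons_append, List.nil_append]
              rw [chain_nr2, goB_nr2]
              exact congrArg (repF ++ ·) (ih Z (by simp at hl; omega) (hasSplit_drop 5 _ hS))
            · by_cases h4 : (['<', 'n', '>'] : List Char).isPrefixOf (c :: t) = true
              · obtain ⟨Z, hZ⟩ := List.isPrefixOf_iff_prefix.mp h4
                injection hZ with hc ht2
                subst hc; subst ht2
                try simp only [List.append_eq, List.cons_append, List.nil_append]
                try simp only [List.append_eq, List.cons_append, List.nil_append]
                rw [chain_n, goB_n]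
                exact congrArg (repD ++ ·) (ih Z (by simp at hl; omega) (hasSplit_drop 3 _ hS))
              · have htn : t.length ≤ n := by simp at hl; omega
                have hparts := hasSplit_parts c t hS
                rw [chain_cons_step n c t htn h0 h1 h2 h3 h4 hparts.1 hparts.2.1
                      hparts.2.2.1 hparts.2.2.2,
                    goB_other c t (Bool.eq_false_iff.mpr h0) (Bool.eq_false_iff.mpr h1)
                      (Bool.eq_false_iff.mpr h2) (Bool.eq_false_iff.mpr h3) (Bool.eq_false_iff.mpr h4)]
                exact congrArg (c :: ·) (ih t htn (hasSplit_tail c t hS))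




-- ===== tightness: A ≠ B everywhere inside D_ =====

theorem smA_pend (rest : List Char) (p : Char) (pend : List Char) (c : Char) (cs : List Char)
    (saw : Bool) : smA rest (p :: pend) (c :: cs) saw = (p == c && smA rest pend cs saw) := by
  cases rest <;> rfl

-- smA inversion: matching the pending 'rmt>' forces those four characters
theorem smA_pend_inv (rest cs : List Char) (saw : Bool)
    (h : smA rest "rmt>".toList cs saw = true) :
    ∃ cs4, cs = 'r' :: 'm' :: 't' :: '>' :: cs4 ∧ smA rest [] cs4 saw = true := by
  match cs with
  | [] => cases rest <;> simp [smA] at h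
  | c0 :: cs0 =>
    have h0 : ('r' == c0 && smA rest ['m', 't', '>'] cs0 saw) = true := by
      rw [← smA_pend]; exact h
    have hc0 := (Bool.and_eq_true_iff.mp h0).1
    have h1 := (Bool.and_eq_true_iff.mp h0).2
    match cs0 with
    | [] => cases rest <;> simp [smA] at h1
    | c1 :: cs1 =>
      have h1' : ('m' == c1 && smA rest ['t', '>'] cs1 saw) = true := by
        rw [← smA_pend]; exact h1
      have hc1 := (Bool.and_eq_true_iff.mp h1').1
      have h2 := (Bool.and_eq_true_iff.mp h1').2
      match cs1 with
      | [] => cases rest <;> simp [smA] at h2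
      | c2 :: cs2 =>
        have h2' : ('t' == c2 && smA rest ['>'] cs2 saw) = true := by
          rw [← smA_pend]; exact h2
        have hc2 := (Bool.and_eq_true_iff.mp h2').1
        have h3 := (Bool.and_eq_true_iff.mp h2').2
        match cs2 with
        | [] => cases rest <;> simp [smA] at h3
        | c3 :: cs3 =>
          have h3' : ('>' == c3 && smA rest [] cs3 saw) = true := by
            rw [← smA_pend]; exact h3
          have hc3 := (Bool.and_eq_true_iff.mp h3').1
          have h4 := (Bool.and_eq_true_iff.mp h3').2
          refine ⟨cs3, ?_, h4⟩
          have e0 : 'r' = c0 := by simpa using hc0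
          have e1 : 'm' = c1 := by simpa using hc1
          have e2 : 't' = c2 := by simpa using hc2
          have e3 : '>' = c3 := by simpa using hc3
          rw [← e0, ← e1, ← e2, ← e3]

-- soundness of the automaton: an accepted '<'-free remainder prefixes the deleted tail
theorem smA_sound : ∀ (n : Nat) (t : List Char), t.length ≤ n →
    ∀ (rest : List Char) (saw : Bool), '<' ∉ rest → smA rest [] t saw = true →
      rest <+: rep1 '<' ['r', 'm', 't', '>'] [] t := by
  intro n
  induction n with
  | zero =>
    intro t ht rest saw hlt h
    have : t = [] := by cases t <;> simp_all
    subst this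
    cases rest with
    | nil => exact List.nil_prefix
    | cons a r' => simp [smA] at h
  | succ n ih =>
    intro t ht rest saw hlt h
    cases rest with
    | nil => exact List.nil_prefix
    | cons a r' =>
      cases t with
      | nil => simp [smA] at h
      | cons c t' =>
        rw [smA_cons] at h
        rcases Bool.or_eq_true_iff.mp h with h' | h'
        · -- consume: a = c, and a ≠ '<' so '<rmt>' does not start here
          have hac : a = c := by
            have := (Bool.and_eq_true_iff.mp h').1; simpa using this
          have hsm := (Bool.and_eq_true_iff.mp h').2
          have ha : a ≠ '<' := by simp at hlt; exact fun he => hlt.1 he.symm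
          have hnp : (['<', 'r', 'm', 't', '>'] : List Char).isPrefixOf (c :: t') = false := by
            simp [List.isPrefixOf]
            intro hcontra
            exact absurd (hcontra ▸ hac) ha
          rw [rep1_neg _ _ _ _ _ hnp, List.cons_prefix_cons]
          exact ⟨hac, ih t' (by simp at ht; omega) r' saw (by simp at hlt; exact fun hx => hlt.2 hx) hsm⟩
        · -- skip: c = '<' and t' begins with 'r' :: 'm' :: 't' :: '>'
          have hc : c = '<' := by
            have := (Bool.and_eq_true_iff.mp h').1; simpa using this
          have hsm := (Bool.and_eq_true_iff.mp h').2
          obtain ⟨cs4, hcs, hsm'⟩ := smA_pend_inv _ _ _ hsm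
          subst hc; subst hcs
          rw [rep1_pos _ _ _ _ _ (by rfl)]
          simp only [List.length_cons, List.length_nil, List.drop_succ_cons, List.drop_zero,
            List.nil_append]
          exact ih cs4 (by simp at ht; omega) (a :: r') true hlt hsm'

-- half-chain lemmas: the four numeric passes on a tail that begins with a token
theorem halfchain_nrf (X : List Char) :
    rep1 '<' ['n', '>'] repD (rep1 '<' ['n', 'r', '2', '>'] repF (rep1 '<' ['n', 'r', '1', '>'] repD
      (rep1 '<' ['n', 'r', 'f', '>'] repF (('<' :: ['n', 'r', 'f', '>']) ++ X)))) =
    repF ++ rep1 '<' ['n', '>'] repD (rep1 '<' ['n', 'r', '2', '>'] repF (rep1 '<' ['n', 'r', '1', '>'] repD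
      (rep1 '<' ['n', 'r', 'f', '>'] repF X))) := by
  simp only [List.cons_append]
  rw [rep1_pos '<' ['n', 'r', 'f', '>'] repF _ _ (by rfl)]
  simp only [List.length_cons, List.length_nil, List.drop_succ_cons, List.drop_zero, List.nil_append]
  rw [show (repF ++ rep1 '<' ['n', 'r', 'f', '>'] repF X) =
        ('%' :: ['.', '3', 'f']) ++ rep1 '<' ['n', 'r', 'f', '>'] repF X from rfl]
  rw [pull_block ['n', 'r', '1', '>'] repD '%' ['.', '3', 'f'] _ (by rfl) (by simp)]
  rw [pull_block ['n', 'r', '2', '>'] repF '%' ['.', '3', 'f'] _ (by rfl) (by simp)]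
  rw [pull_block ['n', '>'] repD '%' ['.', '3', 'f'] _ (by rfl) (by simp)]
  rfl

theorem halfchain_nr1 (X : List Char) :
    rep1 '<' ['n', '>'] repD (rep1 '<' ['n', 'r', '2', '>'] repF (rep1 '<' ['n', 'r', '1', '>'] repD
      (rep1 '<' ['n', 'r', 'f', '>'] repF (('<' :: ['n', 'r', '1', '>']) ++ X)))) =
    repD ++ rep1 '<' ['n', '>'] repD (rep1 '<' ['n', 'r', '2', '>'] repF (rep1 '<' ['n', 'r', '1', '>'] repD
      (rep1 '<' ['n', 'r', 'f', '>'] repF X))) := by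
  rw [pull_block ['n', 'r', 'f', '>'] repF '<' ['n', 'r', '1', '>'] _ (by rfl) (by simp)]
  simp only [List.cons_append]
  rw [rep1_pos '<' ['n', 'r', '1', '>'] repD _ _ (by rfl)]
  simp only [List.length_cons, List.length_nil, List.drop_succ_cons, List.drop_zero, List.nil_append]
  rw [show (repD ++ rep1 '<' ['n', 'r', '1', '>'] repD (rep1 '<' ['n', 'r', 'f', '>'] repF X)) =
        ('%' :: ['d']) ++ rep1 '<' ['n', 'r', '1', '>'] repD (rep1 '<' ['n', 'r', 'f', '>'] repF X) from rfl]
  rw [pull_block ['n', 'r', '2', '>'] repF '%' ['d'] _ (by rfl) (by simp)]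
  rw [pull_block ['n', '>'] repD '%' ['d'] _ (by rfl) (by simp)]
  rfl

theorem halfchain_nr2 (X : List Char) :
    rep1 '<' ['n', '>'] repD (rep1 '<' ['n', 'r', '2', '>'] repF (rep1 '<' ['n', 'r', '1', '>'] repD
      (rep1 '<' ['n', 'r', 'f', '>'] repF (('<' :: ['n', 'r', '2', '>']) ++ X)))) =
    repF ++ rep1 '<' ['n', '>'] repD (rep1 '<' ['n', 'r', '2', '>'] repF (rep1 '<' ['n', 'r', '1', '>'] repD
      (rep1 '<' ['n', 'r', 'f', '>'] repF X))) := by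
  rw [pull_block ['n', 'r', 'f', '>'] repF '<' ['n', 'r', '2', '>'] _ (by rfl) (by simp)]
  rw [pull_block ['n', 'r', '1', '>'] repD '<' ['n', 'r', '2', '>'] _ (by rfl) (by simp)]
  simp only [List.cons_append]
  rw [rep1_pos '<' ['n', 'r', '2', '>'] repF _ _ (by rfl)]
  simp only [List.length_cons, List.length_nil, List.drop_succ_cons, List.drop_zero, List.nil_append]
  rw [show (repF ++ rep1 '<' ['n', 'r', '2', '>'] repF (rep1 '<' ['n', 'r', '1', '>'] repD
        (rep1 '<' ['n', 'r', 'f', '>'] repF X))) =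
        ('%' :: ['.', '3', 'f']) ++ rep1 '<' ['n', 'r', '2', '>'] repF (rep1 '<' ['n', 'r', '1', '>'] repD
        (rep1 '<' ['n', 'r', 'f', '>'] repF X)) from rfl]
  rw [pull_block ['n', '>'] repD '%' ['.', '3', 'f'] _ (by rfl) (by simp)]
  rfl

theorem halfchain_n (X : List Char) :
    rep1 '<' ['n', '>'] repD (rep1 '<' ['n', 'r', '2', '>'] repF (rep1 '<' ['n', 'r', '1', '>'] repD
      (rep1 '<' ['n', 'r', 'f', '>'] repF (('<' :: ['n', '>']) ++ X)))) =
    repD ++ rep1 '<' ['n', '>'] repD (rep1 '<' ['n', 'r', '2', '>'] repF (rep1 '<' ['n', 'r', '1', '>'] repD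
      (rep1 '<' ['n', 'r', 'f', '>'] repF X))) := by
  rw [pull_block ['n', 'r', 'f', '>'] repF '<' ['n', '>'] _ (by rfl) (by simp)]
  rw [pull_block ['n', 'r', '1', '>'] repD '<' ['n', '>'] _ (by rfl) (by simp)]
  rw [pull_block ['n', 'r', '2', '>'] repF '<' ['n', '>'] _ (by rfl) (by simp)]
  simp only [List.cons_append]
  rw [rep1_pos '<' ['n', '>'] repD _ _ (by rfl)]
  simp only [List.length_cons, List.length_nil, List.drop_succ_cons, List.drop_zero,
    List.nil_append]

-- hasSplit ignores a whole token at the head (no split can start at or inside it)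
theorem hasSplit_tok_rmt (Z : List Char) :
    hasSplit ('<' :: 'r' :: 'm' :: 't' :: '>' :: Z) = hasSplit Z := by
  simp [hasSplit, splitTokAt, smA_cons, smA_nil]

theorem hasSplit_tok_nrf (Z : List Char) :
    hasSplit ('<' :: 'n' :: 'r' :: 'f' :: '>' :: Z) = hasSplit Z := by
  simp [hasSplit, splitTokAt, smA_cons, smA_nil]

theorem hasSplit_tok_nr1 (Z : List Char) :
    hasSplit ('<' :: 'n' :: 'r' :: '1' :: '>' :: Z) = hasSplit Z := by
  simp [hasSplit, splitTokAt, smA_cons, smA_nil]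

theorem hasSplit_tok_nr2 (Z : List Char) :
    hasSplit ('<' :: 'n' :: 'r' :: '2' :: '>' :: Z) = hasSplit Z := by
  simp [hasSplit, splitTokAt, smA_cons, smA_nil]

theorem hasSplit_tok_n (Z : List Char) :
    hasSplit ('<' :: 'n' :: '>' :: Z) = hasSplit Z := by
  simp [hasSplit, splitTokAt, smA_cons, smA_nil]

-- TIGHT: inside the split region the two results always differ
theorem tight_eq : ∀ (n : Nat) (l : List Char), l.length ≤ n → hasSplit l = true →
    chain l ≠ goB l := by
  intro n
  induction n with
  | zero =>
    intro l hl hS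
    have : l = [] := by cases l <;> simp_all
    subst this
    simp [hasSplit] at hS
  | succ n ih =>
    intro l hl hS
    cases l with
    | nil => simp [hasSplit] at hS
    | cons c t =>
      by_cases h0 : (['<', 'r', 'm', 't', '>'] : List Char).isPrefixOf (c :: t) = true
      · obtain ⟨Z, hZ⟩ := List.isPrefixOf_iff_prefix.mp h0
        injection hZ with hc ht2
        subst hc; subst ht2
        simp only [List.append_eq, List.cons_append, List.nil_append] at hS ⊢
        rw [chain_rmt, goB_rmt]
        rw [hasSplit_tok_rmt] at hS
        exact ih Z (by simp at hl; omega) hS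
      · by_cases h1 : (['<', 'n', 'r', 'f', '>'] : List Char).isPrefixOf (c :: t) = true
        · obtain ⟨Z, hZ⟩ := List.isPrefixOf_iff_prefix.mp h1
          injection hZ with hc ht2
          subst hc; subst ht2
          simp only [List.append_eq, List.cons_append, List.nil_append] at hS ⊢
          rw [chain_nrf, goB_nrf]
          intro heq
          exact ih Z (by simp at hl; omega) (by rw [hasSplit_tok_nrf] at hS; exact hS)
            (List.append_cancel_left heq)
        · by_cases h2 : (['<', 'n', 'r', '1', '>'] : List Char).isPrefixOf (c :: t) = true
          · obtain ⟨Z, hZ⟩ := List.isPrefixOf_iff_prefix.mp h2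
            injection hZ with hc ht2
            subst hc; subst ht2
            simp only [List.append_eq, List.cons_append, List.nil_append] at hS ⊢
            rw [chain_nr1, goB_nr1]
            intro heq
            exact ih Z (by simp at hl; omega) (by rw [hasSplit_tok_nr1] at hS; exact hS)
              (List.append_cancel_left heq)
          · by_cases h3 : (['<', 'n', 'r', '2', '>'] : List Char).isPrefixOf (c :: t) = true
            · obtain ⟨Z, hZ⟩ := List.isPrefixOf_iff_prefix.mp h3
              injection hZ with hc ht2
              subst hc; subst ht2
              simp only [List.append_eq, List.cons_append, List.nil_append] at hS ⊢
              rw [chain_nr2, goB_nr2]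
              intro heq
              exact ih Z (by simp at hl; omega) (by rw [hasSplit_tok_nr2] at hS; exact hS)
                (List.append_cancel_left heq)
            · by_cases h4 : (['<', 'n', '>'] : List Char).isPrefixOf (c :: t) = true
              · obtain ⟨Z, hZ⟩ := List.isPrefixOf_iff_prefix.mp h4
                injection hZ with hc ht2
                subst hc; subst ht2
                simp only [List.append_eq, List.cons_append, List.nil_append] at hS ⊢
                rw [chain_n, goB_n]
                intro heq
                exact ih Z (by simp at hl; omega) (by rw [hasSplit_tok_n] at hS; exact hS)
                  (List.append_cancel_left heq)
              · -- no token at this position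
                have htn : t.length ≤ n := by simp at hl; omega
                rw [hasSplit] at hS
                by_cases hAny : ((["<nrf>", "<nr1>", "<nr2>", "<n>"] : List String).any fun tok =>
                    splitTokAt tok.toList (c :: t)) = true
                · -- a split starts here: A replaces the merged token, B copies c = '<'
                  rcases List.any_eq_true.mp hAny with ⟨tokS, hmem, hsp⟩
                  rw [goB_other c t (Bool.eq_false_iff.mpr h0) (Bool.eq_false_iff.mpr h1)
                    (Bool.eq_false_iff.mpr h2) (Bool.eq_false_iff.mpr h3) (Bool.eq_false_iff.mpr h4)]
                  simp only [List.mem_cons, List.not_mem_nil, or_false] at hmem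
                  rcases hmem with rfl | rfl | rfl | rfl
                  · rw [show ("<nrf>" : String).toList = '<' :: ['n', 'r', 'f', '>'] from rfl,
                        splitTokAt] at hsp
                    have hc : '<' = c := by have := (Bool.and_eq_true_iff.mp hsp).1; simpa using this
                    have hsm := (Bool.and_eq_true_iff.mp hsp).2
                    obtain ⟨X2, hX2⟩ := smA_sound n t htn _ false (by simp) hsm
                    subst hc
                    rw [chain, rep1_neg _ _ _ _ _ (Bool.eq_false_iff.mpr h0), ← hX2,
                        show ('<' :: (['n', 'r', 'f', '>'] ++ X2)) = ('<' :: ['n', 'r', 'f', '>']) ++ X2 from rfl,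
                        halfchain_nrf]
                    intro heq
                    simp [repF] at heq
                  · rw [show ("<nr1>" : String).toList = '<' :: ['n', 'r', '1', '>'] from rfl,
                        splitTokAt] at hsp
                    have hc : '<' = c := by have := (Bool.and_eq_true_iff.mp hsp).1; simpa using this
                    have hsm := (Bool.and_eq_true_iff.mp hsp).2
                    obtain ⟨X2, hX2⟩ := smA_sound n t htn _ false (by simp) hsm
                    subst hc
                    rw [chain, rep1_neg _ _ _ _ _ (Bool.eq_false_iff.mpr h0), ← hX2,
                        show ('<' :: (['n', 'r', '1', '>'] ++ X2)) = ('<' :: ['n', 'r', '1', '>']) ++ X2 from rfl,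
                        halfchain_nr1]
                    intro heq
                    simp [repD] at heq
                  · rw [show ("<nr2>" : String).toList = '<' :: ['n', 'r', '2', '>'] from rfl,
                        splitTokAt] at hsp
                    have hc : '<' = c := by have := (Bool.and_eq_true_iff.mp hsp).1; simpa using this
                    have hsm := (Bool.and_eq_true_iff.mp hsp).2
                    obtain ⟨X2, hX2⟩ := smA_sound n t htn _ false (by simp) hsm
                    subst hc
                    rw [chain, rep1_neg _ _ _ _ _ (Bool.eq_false_iff.mpr h0), ← hX2,
                        show ('<' :: (['n', 'r', '2', '>'] ++ X2)) = ('<' :: ['n', 'r', '2', '>']) ++ X2 from rfl,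
                        halfchain_nr2]
                    intro heq
                    simp [repF] at heq
                  · rw [show ("<n>" : String).toList = '<' :: ['n', '>'] from rfl,
                        splitTokAt] at hsp
                    have hc : '<' = c := by have := (Bool.and_eq_true_iff.mp hsp).1; simpa using this
                    have hsm := (Bool.and_eq_true_iff.mp hsp).2
                    obtain ⟨X2, hX2⟩ := smA_sound n t htn _ false (by simp) hsm
                    subst hc
                    rw [chain, rep1_neg _ _ _ _ _ (Bool.eq_false_iff.mpr h0), ← hX2,
                        show ('<' :: (['n', '>'] ++ X2)) = ('<' :: ['n', '>']) ++ X2 from rfl,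
                        halfchain_n]
                    intro heq
                    simp [repD] at heq
                · -- the split is further right: both copy c and recurse
                  have hAnyF := Bool.eq_false_iff.mpr hAny
                  have hTail : hasSplit t = true := by
                    rw [hAnyF] at hS
                    simpa using hS
                  have hAll := List.any_eq_false.mp hAnyF
                  have hp1 := hAll "<nrf>" (by simp)
                  have hp2 := hAll "<nr1>" (by simp)
                  have hp3 := hAll "<nr2>" (by simp)
                  have hp4 := hAll "<n>" (by simp)
                  rw [show ("<nrf>" : String).toList = ['<', 'n', 'r', 'f', '>'] from rfl] at hp1
                  rw [show ("<nr1>" : String).toList = ['<', 'n', 'r', '1', '>'] from rfl] at hp2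
                  rw [show ("<nr2>" : String).toList = ['<', 'n', 'r', '2', '>'] from rfl] at hp3
                  rw [show ("<n>" : String).toList = ['<', 'n', '>'] from rfl] at hp4
                  rw [chain_cons_step n c t htn h0 h1 h2 h3 h4 (Bool.eq_false_iff.mpr hp1)
                      (Bool.eq_false_iff.mpr hp2) (Bool.eq_false_iff.mpr hp3) (Bool.eq_false_iff.mpr hp4),
                      goB_other c t (Bool.eq_false_iff.mpr h0) (Bool.eq_false_iff.mpr h1)
                      (Bool.eq_false_iff.mpr h2) (Bool.eq_false_iff.mpr h3) (Bool.eq_false_iff.mpr h4)]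
                  intro heq
                  exact ih t htn hTail (by injection heq)

-- ===== VERDICT (by name: the statement is the Claim_ definition above) =====
theorem format_tx_spec : Claim_unchanged_format_tx := by
  intro s _ hD
  have hs : hasSplit s.toList = false := by
    unfold D_format_tx at hD
    exact Bool.eq_false_iff.mpr hD
  have h : (format_tx s).toList = (format_tx_alt s).toList := by
    rw [formatA, main_eq s.toList.length s.toList le_rfl hs]
    simp [format_tx_alt]
  exact String.toList_inj.mp h
theorem format_tx_changed : Claim_changed_format_tx := by
  unfold Claim_changed_format_tx; decide
theorem format_tx_tight : Claim_exact_format_tx := by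
  intro s _ hD
  unfold D_format_tx at hD
  intro heq
  have h1 : chain s.toList = goB s.toList := by
    rw [← formatA, heq]
    simp [format_tx_alt]
  exact tight_eq s.toList.length s.toList le_rfl hD h1
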